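-- pv_equiv track=rewrite | github.com/keon/algorithms | algorithms/stack/switch_pairs.py | first_switch_pairs
-- ===== SOURCE A (Python) =====
-- def first_switch_pairs(stack):
--     storage_stack = []
--     for i in range(len(stack)):
--         storage_stack.append(stack.pop())
--     for i in range(len(storage_stack)):
--         if len(storage_stack) == 0:
--             break
--         first = storage_stack.pop()
--         if len(storage_stack) == 0:    # case: odd number of values in stack
--             stack.append(first)
--             break
--         second = storage_stack.pop()
--         stack.append(second)
--         stack.append(first)
--     return stack
-- ===== SOURCE B (Python) =====
-- def first_switch_pairs(stack):
--     for i in range(0, len(stack) - 1, 2):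
--         stack[i], stack[i + 1] = stack[i + 1], stack[i]
--     return stack
-- ===== Notes on version B (the rewrite author's own statement) =====
-- stated objective: simpler
-- what changed: B drops A's auxiliary storage stack and its two pop/push passes, swapping each adjacent pair in place with one index loop over range(0, len-1, 2).
import Mathlib
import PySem

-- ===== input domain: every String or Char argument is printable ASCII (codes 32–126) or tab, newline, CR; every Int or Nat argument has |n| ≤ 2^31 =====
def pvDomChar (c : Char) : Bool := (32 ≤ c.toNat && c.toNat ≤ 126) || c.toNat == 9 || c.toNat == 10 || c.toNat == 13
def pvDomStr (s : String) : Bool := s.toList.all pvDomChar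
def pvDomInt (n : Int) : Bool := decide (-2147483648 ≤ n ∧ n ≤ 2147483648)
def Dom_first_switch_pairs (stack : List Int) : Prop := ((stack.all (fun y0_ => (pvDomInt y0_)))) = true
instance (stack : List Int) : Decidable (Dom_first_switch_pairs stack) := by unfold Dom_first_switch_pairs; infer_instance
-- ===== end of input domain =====

-- B swaps adjacent pairs in place with one index loop, dropping A's auxiliary storage stack
-- and its two pop/push passes (objective: simpler). Both Pythons mutate the argument list in
-- place identically and return it; the equivalence proved here is about the return value.

-- ===== PORT A =====
-- Python list.pop(): take the last element (none on empty list)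
def pvPop (l : List Int) : Option (Int × List Int) :=
  match l.getLast? with
  | none => none
  | some x => some (x, l.dropLast)

-- first loop: 'for i in range(len(stack)): storage_stack.append(stack.pop())'
def fspLoop1 : Nat → List Int → List Int → List Int × List Int
  | 0, stack, storage => (stack, storage)
  | n + 1, stack, storage =>
    match pvPop stack with
    | none => (stack, storage)
    | some (x, stack') => fspLoop1 n stack' (storage ++ [x])

-- second loop: pop one or two values from storage per iteration, pushing them back swapped
def fspLoop2 : Nat → List Int → List Int → List Int
  | 0, stack, _ => stack
  | n + 1, stack, storage =>
    if storage = [] then stack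
    else
      match pvPop storage with
      | none => stack
      | some (first, st1) =>
        if st1 = [] then stack ++ [first]
        else
          match pvPop st1 with
          | none => stack ++ [first]
          | some (second, st2) => fspLoop2 n (stack ++ [second, first]) st2

def first_switch_pairs (stack : List Int) : List Int :=
  let r1 := fspLoop1 stack.length stack []
  fspLoop2 r1.2.length r1.1 r1.2

-- ===== PORT B =====
-- 'stack[i], stack[i+1] = stack[i+1], stack[i]' for i in range(0, len(stack)-1, 2)
def first_switch_pairs_alt (stack : List Int) : List Int :=
  (PySem.List.pyRange 0 ((stack.length : Int) - 1) 2).foldl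
    (fun s i =>
      match PySem.List.pyGet? s (i + 1), PySem.List.pyGet? s i with
      | some b, some a => (s.set i.toNat b).set (i + 1).toNat a
      | _, _ => s) stack

-- ===== PRECONDITION & SPEC =====
def Spec_first_switch_pairs (stack : List Int) (out : List Int) : Prop := out = first_switch_pairs_alt stack
instance (stack : List Int) (out : List Int) : Decidable (Spec_first_switch_pairs stack out) := by unfold Spec_first_switch_pairs; infer_instance

-- ===== CLAIM (what is proved, stated in full; the proofs are below) =====
def Claim_equal_first_switch_pairs : Prop := ∀ (stack : List Int), Dom_first_switch_pairs stack → Spec_first_switch_pairs stack (first_switch_pairs stack)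

-- ===== LEMMAS AND PROOFS =====

-- reference function both ports are reduced to
def swapPairs : List Int → List Int
  | a :: b :: rest => b :: a :: swapPairs rest
  | l => l

theorem pvPop_concat (l : List Int) (x : Int) : pvPop (l ++ [x]) = some (x, l) := by
  simp [pvPop]

theorem pvPop_reverse_cons (a : Int) (l : List Int) :
    pvPop ((a :: l).reverse) = some (a, l.reverse) := by
  simp [pvPop]

theorem fspLoop1_spec (s : List Int) : ∀ (st : List Int),
    fspLoop1 s.length s st = ([], st ++ s.reverse) := by
  induction s using List.reverseRecOn with
  | nil => intro st; simp [fspLoop1]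
  | append_singleton l x ih =>
    intro st
    have hlen : (l ++ [x]).length = l.length + 1 := by simp
    rw [hlen]
    simp only [fspLoop1, pvPop_concat]
    rw [ih (st ++ [x])]
    simp

theorem fspLoop2_spec (t : List Int) : ∀ (n : Nat) (acc : List Int), t.length ≤ n →
    fspLoop2 n acc t.reverse = acc ++ swapPairs t := by
  induction t using swapPairs.induct with
  | case1 a b rest ih =>
    intro n acc hn
    match n, hn with
    | m + 1, hn2 =>
      have hne : (a :: b :: rest).reverse ≠ [] := by simp
      simp only [fspLoop2, if_neg hne, pvPop_reverse_cons]
      have hne2 : (b :: rest).reverse ≠ [] := by simp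
      rw [if_neg hne2]
      rw [ih m (acc ++ [b, a]) (by simp only [List.length_cons] at hn2; omega)]
      simp [swapPairs]
  | case2 l hl =>
    intro n acc hn
    match l, hl with
    | [], _ =>
      cases n <;> simp [fspLoop2, swapPairs]
    | [a], _ =>
      match n, hn with
      | m + 1, _ =>
        have hne : [a].reverse ≠ [] := by simp
        simp [fspLoop2, pvPop, swapPairs]
    | a :: b :: r, hl => exact (hl a b r rfl).elim

theorem portA_eq_swapPairs (s : List Int) : first_switch_pairs s = swapPairs s := by
  unfold first_switch_pairs
  rw [fspLoop1_spec s []]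
  simpa using fspLoop2_spec s s.reverse.length [] (by simp)

theorem pyRange2_cons {a b : Int} (h : a < b) :
    PySem.List.pyRange a b 2 = a :: PySem.List.pyRange (a + 2) b 2 := by
  rw [PySem.List.pyRange_of_pos a b (by norm_num),
      PySem.List.pyRange_of_pos (a + 2) b (by norm_num)]
  rw [if_pos h]
  have hn : (if a + 2 < b then ((b - (a + 2) + 2 - 1) / 2).toNat else 0) + 1
      = ((b - a + 2 - 1) / 2).toNat := by
    split_ifs with h2 <;> omega
  rw [← hn, List.range_succ_eq_map]
  simp only [List.map_cons, List.map_map, Function.comp_def, Nat.cast_zero, mul_zero,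
    add_zero, List.cons.injEq]
  refine ⟨trivial, List.map_congr_left ?_⟩
  intro k _
  push_cast
  ring

theorem pyRange2_nil {a b : Int} (h : b ≤ a) : PySem.List.pyRange a b 2 = [] := by
  rw [PySem.List.pyRange_of_pos a b (by norm_num), if_neg (by omega)]
  simp

theorem set_at_len (p : List Int) (x y : Int) (t : List Int) :
    (p ++ x :: t).set p.length y = p ++ y :: t := by
  induction p with
  | nil => simp
  | cons h p ih => simpa [List.set] using ih

theorem pyGet?_at_len (p : List Int) (x : Int) (t : List Int) :
    PySem.List.pyGet? (p ++ x :: t) (p.length : Int) = some x := by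
  simp only [PySem.List.pyGet?, PySem.List.pyIdx?, List.length_append, List.length_cons]
  rw [if_pos (by positivity), if_pos (by push_cast; omega)]
  simp only [Int.toNat_natCast]
  show (p ++ x :: t)[p.length]? = some x
  rw [List.getElem?_append_right (Nat.le_refl _)]
  simp

theorem pyGet?_at_len_succ (p : List Int) (x y : Int) (t : List Int) :
    PySem.List.pyGet? (p ++ x :: y :: t) ((p.length : Int) + 1) = some y := by
  simp only [PySem.List.pyGet?, PySem.List.pyIdx?, List.length_append, List.length_cons]
  rw [if_pos (by positivity), if_pos (by push_cast; omega)]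
  have ht : ((p.length : Int) + 1).toNat = p.length + 1 := by omega
  simp only [ht]
  show (p ++ x :: y :: t)[p.length + 1]? = some y
  rw [List.getElem?_append_right (by omega)]
  simp

theorem fold_swap_spec (t : List Int) : ∀ (p : List Int),
    (PySem.List.pyRange (p.length : Int) (((p ++ t).length : Int) - 1) 2).foldl
      (fun s i =>
        match PySem.List.pyGet? s (i + 1), PySem.List.pyGet? s i with
        | some b, some a => (s.set i.toNat b).set (i + 1).toNat a
        | _, _ => s) (p ++ t) = p ++ swapPairs t := by
  induction t using swapPairs.induct with
  | case1 a b rest ih =>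
    intro p
    have hlt : (p.length : Int) < ((p ++ a :: b :: rest).length : Int) - 1 := by
      simp only [List.length_append, List.length_cons]
      push_cast
      omega
    rw [pyRange2_cons hlt]
    simp only [List.foldl_cons, pyGet?_at_len_succ, pyGet?_at_len]
    have hset : (((p ++ a :: b :: rest).set ((p.length : Int)).toNat b).set
        (((p.length : Int) + 1)).toNat a) = (p ++ [b, a]) ++ rest := by
      have h1 : ((p.length : Int)).toNat = p.length := by omega
      have h2 : (((p.length : Int) + 1)).toNat = p.length + 1 := by omega
      rw [h1, h2, set_at_len]
      rw [show p ++ b :: b :: rest = (p ++ [b]) ++ b :: rest by simp,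
          show p.length + 1 = (p ++ [b]).length by simp, set_at_len]
      simp
    rw [hset]
    have := ih (p ++ [b, a])
    have hlen2 : ((p ++ [b, a]).length : Int) = (p.length : Int) + 2 := by
      simp only [List.length_append, List.length_cons, List.length_nil]
      push_cast
      omega
    rw [hlen2] at this
    have hlenr : (((p ++ [b, a]) ++ rest).length : Int) = ((p ++ a :: b :: rest).length : Int) := by
      simp only [List.length_append, List.length_cons, List.length_nil]
      push_cast
      omega
    rw [hlenr] at this
    rw [this]
    simp [swapPairs]
  | case2 l hl =>
    intro p
    match l, hl with
    | [], _ =>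
      rw [pyRange2_nil (by simp)]
      simp [swapPairs]
    | [a], _ =>
      rw [pyRange2_nil (by simp)]
      simp [swapPairs]
    | a :: b :: r, hl => exact (hl a b r rfl).elim

theorem portB_eq_swapPairs (s : List Int) : first_switch_pairs_alt s = swapPairs s := by
  unfold first_switch_pairs_alt
  simpa using fold_swap_spec s []

-- ===== VERDICT (by name: the statement is the Claim_ definition above) =====
theorem first_switch_pairs_spec : Claim_equal_first_switch_pairs := by
  intro stack _
  unfold Spec_first_switch_pairs
  rw [portA_eq_swapPairs, portB_eq_swapPairs]
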